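-- pv_equiv track=rewrite | github.com/helenbr/Google-foobar | level 2/hey-i-already-did-that/solution.py | solution
-- ===== SOURCE A (Python) =====
-- def binary_to_decimal(n, b):
--     result = 0
--     for d in n:
--       result = b * result + int(d)
--     return result
--
-- def decimal_to_binary(n, b, k):
--     result = ''
--     while n > 0:
--         d = n % b
--         result = str(d) + result
--         n = n // b
--     return result.zfill(k)
--
-- def solution(n, b):
--     k = len(n)
--     array = []
--     seen = set()
--     while n not in array:
--         array.append(n)
--         seen.add(n)
--         x = binary_to_decimal(sorted(n, reverse=True), b)
--         y = binary_to_decimal(sorted(n), b)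
--         z = decimal_to_binary(x - y, b, k)
--         if z == n:
--             return 1
--         n = z
--         if n in seen:
--             return len(array) - array.index(n)
--     return len(array)
-- ===== SOURCE B (Python) =====
-- def binary_to_decimal(n, b):
--     result = 0
--     for d in n:
--       result = b * result + int(d)
--     return result
--
-- def decimal_to_binary(n, b, k):
--     result = ''
--     while n > 0:
--         d = n % b
--         result = str(d) + result
--         n = n // b
--     return result.zfill(k)
--
-- def step(s, b, k):
--     return decimal_to_binary(
--         binary_to_decimal(sorted(s, reverse=True), b)
--         - binary_to_decimal(sorted(s), b), b, k)
--
-- def solution(n, b):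
--     k = len(n)
--     # Floyd cycle detection: no history container at all.
--     slow = step(n, b, k)
--     fast = step(slow, b, k)
--     while slow != fast:
--         slow = step(slow, b, k)
--         fast = step(step(fast, b, k), b, k)
--     # slow is on the cycle; walk once around it to measure the period.
--     p = 1
--     cur = step(slow, b, k)
--     while cur != slow:
--         cur = step(cur, b, k)
--         p += 1
--     return p
-- ===== Notes on version B (the rewrite author's own statement) =====
-- stated objective: alternative
-- what changed: A records the whole orbit in a visited list plus a shadow set and finds the cycle length with an array.index scan; B stores no history at all: Floyd's two-pointer (tortoise/hare) cycle detection finds a state on the cycle, then walks once around it counting the period.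
-- outside the precondition, e.g. on solution('10', 0): A returns 1, B returns 1; on solution('73', -4): A returns 1, B returns 1; on solution('a1', 3): A raises ValueError, B raises ValueError
import Mathlib
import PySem

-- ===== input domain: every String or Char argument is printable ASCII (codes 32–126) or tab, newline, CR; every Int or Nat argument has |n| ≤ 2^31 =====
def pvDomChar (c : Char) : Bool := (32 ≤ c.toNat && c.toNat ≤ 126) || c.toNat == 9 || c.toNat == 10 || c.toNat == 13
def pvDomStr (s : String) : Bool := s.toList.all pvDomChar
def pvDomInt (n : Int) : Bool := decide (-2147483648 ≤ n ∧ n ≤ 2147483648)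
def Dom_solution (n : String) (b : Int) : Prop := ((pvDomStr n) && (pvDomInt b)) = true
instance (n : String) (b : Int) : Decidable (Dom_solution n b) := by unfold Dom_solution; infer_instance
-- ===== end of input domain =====

-- B replaces A's visited-list-plus-set history and its array.index scan by Floyd's
-- tortoise/hare cycle detection followed by one walk around the cycle, keeping no
-- history container at all; objective: alternative.  Return-value equivalence only
-- (no argument is mutated).

-- ===== PORT A =====
-- int(d) for the one-char string d; Python raises ValueError on a non-digit —
-- .getD 0 is only reached outside Pre_solution (all chars are ASCII digits there).
def pvIntOfChar (d : Char) : Int := (PySem.Int.ofChars? [d]).getD 0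

def binary_to_decimal (n : List Char) (b : Int) : Int :=
  n.foldl (fun result d => b * result + pvIntOfChar d) 0

-- the 'while n > 0' loop of decimal_to_binary, on fuel; for b ≥ 2 the quotient
-- shrinks strictly, so fuel n.toNat + 1 never runs out inside Pre_solution
def d2bLoop : Nat → Int → Int → List Char → List Char
  | 0, _, _, result => result
  | fuel + 1, n, b, result =>
    if n > 0 then
      d2bLoop fuel (PySem.Int.floordiv n b) b
        (PySem.Int.toChars (PySem.Int.mod n b) ++ result)
    else result

def decimal_to_binary (n : Int) (b : Int) (k : Nat) : String :=
  String.ofList (PySem.Chars.zfill (d2bLoop (n.toNat + 1) n b []) (k : Int))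

-- A's while loop, on fuel; inside Pre_solution the orbit of digit strings of
-- length ≤ k+4 repeats within 11^(k+4)+2 steps (proved below), so fuel
-- 11^(k+6) never runs out there
def solutionLoop (b : Int) (k : Nat) :
    Nat → List String → PySem.Set String → String → Int
  | 0, _, _, _ => 0
  | fuel + 1, array, seen, n =>
    if array.contains n then (array.length : Int)
    else
      let array' := array ++ [n]
      let seen' := PySem.Set.add seen n
      let x := binary_to_decimal (PySem.List.sorted n.toList (fun c => c) true) b
      let y := binary_to_decimal (PySem.List.sorted n.toList (fun c => c) false) b
      let z := decimal_to_binary (x - y) b k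
      if z = n then 1
      else if PySem.Set.contains seen' z then
        (array'.length : Int) - (((PySem.List.index? array' z).getD 0 : Nat) : Int)
      else solutionLoop b k fuel array' seen' z

def solution (n : String) (b : Int) : Int :=
  solutionLoop b n.length (11 ^ (n.length + 6)) [] PySem.Set.empty n

-- ===== PORT B =====
def step (s : String) (b : Int) (k : Nat) : String :=
  decimal_to_binary
    (binary_to_decimal (PySem.List.sorted s.toList (fun c => c) true) b
      - binary_to_decimal (PySem.List.sorted s.toList (fun c => c) false) b) b k

-- Floyd phase 1: advance slow by one step and fast by two until they meet
def floydLoop (b : Int) (k : Nat) : Nat → String → String → String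
  | 0, slow, _ => slow
  | fuel + 1, slow, fast =>
    if slow = fast then slow
    else floydLoop b k fuel (step slow b k) (step (step fast b k) b k)

-- Floyd phase 2: walk once around the cycle from the meeting point, counting
def periodLoop (b : Int) (k : Nat) : Nat → String → String → Int → Int
  | 0, _, _, p => p
  | fuel + 1, slow, cur, p =>
    if cur = slow then p
    else periodLoop b k fuel slow (step cur b k) (p + 1)

def solution_alt (n : String) (b : Int) : Int :=
  let k := n.length
  let slow := step n b k
  let fast := step slow b k
  let m := floydLoop b k (11 ^ (k + 6)) slow fast
  periodLoop b k (11 ^ (k + 6)) m (step m b k) 1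

-- ===== PRECONDITION & SPEC =====
-- Pre_ is the problem's natural domain (Google-foobar: n a string of ASCII digits,
-- base 2..10) plus, for any base, the strings whose digits are all equal (there the
-- transform is constantly zero and no division is ever executed, so A returns for
-- every b).  Outside Pre_, A raises ValueError (a non-digit char reaches int(d)) or,
-- for bases outside 2..10 on a non-constant digit string, in general diverges or
-- raises ZeroDivisionError (on a few such inputs A still happens to return; see the
-- claim's cites).
def Pre_solution (n : String) (b : Int) : Prop :=
  n.toList.all (fun c => decide ('0' ≤ c ∧ c ≤ '9')) = true ∧
  ((2 ≤ b ∧ b ≤ 10) ∨ n.toList.all (fun c => n.toList.all (fun d => c == d)) = true)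
instance (n : String) (b : Int) : Decidable (Pre_solution n b) := by
  unfold Pre_solution; infer_instance

def pvWitness_solution : String × Int := ("210", 3)

def Spec_solution (n : String) (b : Int) (out : Int) : Prop := out = solution_alt n b
instance (n : String) (b : Int) (out : Int) : Decidable (Spec_solution n b out) := by
  unfold Spec_solution; infer_instance

-- ===== CLAIM (what is proved, stated in full; the proofs are below) =====
def Claim_equal_solution : Prop :=
  ∀ (n : String) (b : Int), Dom_solution n b → Pre_solution n b →
    Spec_solution n b (solution n b)

-- ===== LEMMAS AND PROOFS =====

-- the transform as a function (proof-side name for B's step; A computes the same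
-- expression inline)
def stepFn (b : Int) (k : Nat) : String → String := fun s => step s b k

-- ---------- generic orbit/period theory ----------

lemma orbit_add (g : String → String) (x0 : String) (μ lam : Nat)
    (hper : g^[μ + lam] x0 = g^[μ] x0) :
    ∀ t, μ ≤ t → g^[t + lam] x0 = g^[t] x0 := by
  intro t ht
  obtain ⟨d, rfl⟩ := Nat.exists_eq_add_of_le ht
  have h := congrArg (g^[d]) hper
  rw [← Function.iterate_add_apply, ← Function.iterate_add_apply] at h
  have e1 : μ + d + lam = d + (μ + lam) := by omega
  have e2 : μ + d = d + μ := by omega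
  rw [e1, e2]; exact h

lemma orbit_add_mul (g : String → String) (x0 : String) (μ lam : Nat)
    (hper : g^[μ + lam] x0 = g^[μ] x0) :
    ∀ m t, μ ≤ t → g^[t + m * lam] x0 = g^[t] x0 := by
  intro m
  induction m with
  | zero => simp
  | succ m ih =>
    intro t ht
    have e : t + (m + 1) * lam = (t + lam) + m * lam := by ring
    rw [e, ih (t + lam) (by omega), orbit_add g x0 μ lam hper t ht]

lemma orbit_reduce (g : String → String) (x0 : String) (μ lam : Nat) (hlam : 1 ≤ lam)
    (hper : g^[μ + lam] x0 = g^[μ] x0) :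
    ∀ t, μ ≤ t → g^[t] x0 = g^[μ + (t - μ) % lam] x0 := by
  intro t ht
  have hqr := Nat.div_add_mod (t - μ) lam
  have hr : (t - μ) % lam < lam := Nat.mod_lt _ (by omega)
  have key : (μ + (t - μ) % lam) + ((t - μ) / lam) * lam = t := by
    rw [Nat.mul_comm]; omega
  conv_lhs => rw [← key]
  rw [orbit_add_mul g x0 μ lam hper ((t - μ) / lam) (μ + (t - μ) % lam) (by omega)]

lemma orbit_dvd (g : String → String) (x0 : String) (μ lam : Nat) (hlam : 1 ≤ lam)
    (hper : g^[μ + lam] x0 = g^[μ] x0)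
    (hinj : ∀ s t, s < t → t < μ + lam → g^[s] x0 ≠ g^[t] x0) :
    ∀ t p, μ ≤ t → 1 ≤ p → g^[t + p] x0 = g^[t] x0 → lam ∣ p := by
  intro t p ht hp heq
  have h1 := orbit_reduce g x0 μ lam hlam hper t ht
  have h2 := orbit_reduce g x0 μ lam hlam hper (t + p) (by omega)
  set r1 := (t + p - μ) % lam with hr1d
  set r2 := (t - μ) % lam with hr2d
  have hr1 : r1 < lam := Nat.mod_lt _ (by omega)
  have hr2 : r2 < lam := Nat.mod_lt _ (by omega)
  have hx : g^[μ + r1] x0 = g^[μ + r2] x0 := by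
    rw [← h1, ← h2, heq]
  have hreq : r1 = r2 := by
    rcases Nat.lt_trichotomy r1 r2 with h | h | h
    · exact absurd hx (hinj (μ + r1) (μ + r2) (by omega) (by omega))
    · exact h
    · exact absurd hx.symm (hinj (μ + r2) (μ + r1) (by omega) (by omega))
  have hmodeq : (t - μ) ≡ (t - μ) + p [MOD lam] := by
    show (t - μ) % lam = ((t - μ) + p) % lam
    have e : (t - μ) + p = t + p - μ := by omega
    rw [e]
    exact hreq.symm
  have := (Nat.modEq_iff_dvd' (by omega)).mp hmodeq
  simpa using this

-- ---------- characterisation of A's loop ----------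

lemma index_map_range (x : Nat → String) (m μ : Nat) (hμ : μ < m)
    (hne : ∀ s, s < μ → x s ≠ x μ) :
    PySem.List.index? ((List.range m).map x) (x μ) = some μ := by
  apply (PySem.List.index?_eq_some_iff _ _ _).mpr
  refine ⟨(List.range μ).map x, ((List.range (m - μ - 1)).map (fun i => x (μ + 1 + i))), ?_, by simp, ?_⟩
  · have e : m = (μ + 1) + (m - μ - 1) := by omega
    rw [e, List.range_add, List.range_succ]
    simp [List.map_map, Function.comp_def]
    congr 2
    omega
  · simp only [List.mem_map, List.mem_range]
    rintro ⟨s, hs, hsx⟩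
    exact hne s hs hsx

lemma A_loop (b : Int) (k : Nat) (x0 : String) (μ lam : Nat) (hlam : 1 ≤ lam)
    (hper : (stepFn b k)^[μ + lam] x0 = (stepFn b k)^[μ] x0)
    (hinj : ∀ s t, s < t → t < μ + lam → (stepFn b k)^[s] x0 ≠ (stepFn b k)^[t] x0) :
    ∀ fuel t (seen : PySem.Set String), t < μ + lam → μ + lam - t ≤ fuel →
      (∀ y, y ∈ seen ↔ y ∈ (List.range t).map (fun s => (stepFn b k)^[s] x0)) →
      solutionLoop b k fuel ((List.range t).map (fun s => (stepFn b k)^[s] x0)) seen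
        ((stepFn b k)^[t] x0) = (lam : Int) := by
  intro fuel
  induction fuel with
  | zero => intro t seen ht hf _; omega
  | succ fuel ih =>
    intro t seen ht hf hseen
    have hnotm : (stepFn b k)^[t] x0 ∉ (List.range t).map (fun s => (stepFn b k)^[s] x0) := by
      simp only [List.mem_map, List.mem_range]
      rintro ⟨s, hs, hsx⟩
      exact hinj s t hs ht hsx
    have hcont : ((List.range t).map (fun s => (stepFn b k)^[s] x0)).contains
        ((stepFn b k)^[t] x0) = false := by
      simpa using hnotm
    simp only [solutionLoop, hcont, Bool.false_eq_true, if_false]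
    have hz : decimal_to_binary
        (binary_to_decimal (PySem.List.sorted ((stepFn b k)^[t] x0).toList (fun c => c) true) b -
          binary_to_decimal (PySem.List.sorted ((stepFn b k)^[t] x0).toList (fun c => c) false) b)
        b k = (stepFn b k)^[t + 1] x0 := by
      rw [Function.iterate_succ_apply']; rfl
    rw [hz]
    have harr : (List.range t).map (fun s => (stepFn b k)^[s] x0) ++ [(stepFn b k)^[t] x0]
        = (List.range (t + 1)).map (fun s => (stepFn b k)^[s] x0) := by
      rw [List.range_succ]; simp
    by_cases he : (stepFn b k)^[t + 1] x0 = (stepFn b k)^[t] x0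
    · rw [if_pos he]
      have ht1 : t + 1 = μ + lam := by
        by_contra hne
        have hlt : t + 1 < μ + lam := by omega
        exact hinj t (t + 1) (by omega) hlt he.symm
      have hμt : μ = t := by
        by_contra hne
        have hμlt : μ < t := by omega
        have hx : (stepFn b k)^[μ] x0 = (stepFn b k)^[t] x0 := by
          calc (stepFn b k)^[μ] x0 = (stepFn b k)^[μ + lam] x0 := hper.symm
            _ = (stepFn b k)^[t + 1] x0 := by rw [ht1]
            _ = (stepFn b k)^[t] x0 := he
        exact hinj μ t hμlt ht hx
      have hl1 : lam = 1 := by omega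
      rw [hl1]; norm_num
    · rw [if_neg he]
      by_cases hT : t + 1 = μ + lam
      · have hzμ : (stepFn b k)^[t + 1] x0 = (stepFn b k)^[μ] x0 := by
          rw [hT]; exact hper
        have hμle : μ ≤ t := by omega
        have hmem : (stepFn b k)^[t + 1] x0
            ∈ PySem.Set.add seen ((stepFn b k)^[t] x0) := by
          rw [PySem.Set.mem_add]
          by_cases hμt : μ = t
          · right; rw [hzμ, hμt]
          · left
            apply (hseen _).mpr
            simp only [List.mem_map, List.mem_range]
            exact ⟨μ, by omega, hzμ.symm⟩
        have hcon2 : PySem.Set.contains (PySem.Set.add seen ((stepFn b k)^[t] x0))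
            ((stepFn b k)^[t + 1] x0) = true := by
          rw [PySem.Set.contains_iff]; exact hmem
        rw [if_pos hcon2, harr, hzμ,
          index_map_range (fun s => (stepFn b k)^[s] x0) (t + 1) μ (by omega)
            (fun s hs => hinj s μ hs (by omega))]
        simp only [Option.getD_some, List.length_map, List.length_range]
        push_cast
        omega
      · have hT' : t + 1 < μ + lam := by omega
        have hnotmem : (stepFn b k)^[t + 1] x0
            ∉ PySem.Set.add seen ((stepFn b k)^[t] x0) := by
          rw [PySem.Set.mem_add]
          rintro (h | h)
          · obtain ⟨s, hs, hsx⟩ := by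
              simpa only [List.mem_map, List.mem_range] using (hseen _).mp h
            exact hinj s (t + 1) (by omega) hT' hsx
          · exact he h
        have hcon2 : PySem.Set.contains (PySem.Set.add seen ((stepFn b k)^[t] x0))
            ((stepFn b k)^[t + 1] x0) = false := by
          rw [Bool.eq_false_iff]
          intro hc
          exact hnotmem ((PySem.Set.contains_iff _ _).mp hc)
        rw [if_neg (by rw [hcon2]; exact Bool.false_ne_true), harr]
        apply ih (t + 1) (PySem.Set.add seen ((stepFn b k)^[t] x0)) hT' (by omega)
        intro y
        rw [PySem.Set.mem_add, List.range_succ]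
        simp only [List.map_append, List.mem_append, List.map_cons, List.map_nil,
          List.mem_singleton]
        constructor
        · rintro (h | h)
          · exact Or.inl ((hseen y).mp h)
          · exact Or.inr (by simp [h])
        · rintro (h | h)
          · exact Or.inl ((hseen y).mpr h)
          · exact Or.inr (by simpa using h)

lemma A_val (b : Int) (k : Nat) (x0 : String) (μ lam : Nat) (hlam : 1 ≤ lam)
    (hper : (stepFn b k)^[μ + lam] x0 = (stepFn b k)^[μ] x0)
    (hinj : ∀ s t, s < t → t < μ + lam → (stepFn b k)^[s] x0 ≠ (stepFn b k)^[t] x0)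
    (F : Nat) (hF : μ + lam ≤ F) :
    solutionLoop b k F [] PySem.Set.empty x0 = (lam : Int) := by
  have h := A_loop b k x0 μ lam hlam hper hinj F 0 PySem.Set.empty (by omega) (by omega)
    (by intro y; simp [PySem.Set.empty])
  simpa using h

-- ---------- characterisation of B's two loops ----------

lemma B_floyd (b : Int) (k : Nat) (x0 : String) (i0 : Nat) (h1 : 1 ≤ i0)
    (heq : (stepFn b k)^[i0] x0 = (stepFn b k)^[2 * i0] x0)
    (hmin : ∀ j, 1 ≤ j → (stepFn b k)^[j] x0 = (stepFn b k)^[2 * j] x0 → i0 ≤ j) :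
    ∀ fuel i, 1 ≤ i → i ≤ i0 → i0 - i ≤ fuel →
      floydLoop b k fuel ((stepFn b k)^[i] x0) ((stepFn b k)^[2 * i] x0)
        = (stepFn b k)^[i0] x0 := by
  intro fuel
  induction fuel with
  | zero =>
    intro i h1i hii0 hf
    have : i = i0 := by omega
    subst this
    simp [floydLoop]
  | succ fuel ih =>
    intro i h1i hii0 hf
    rw [floydLoop]
    by_cases he : (stepFn b k)^[i] x0 = (stepFn b k)^[2 * i] x0
    · rw [if_pos he]
      have h2 : i0 ≤ i := hmin i h1i he
      have : i = i0 := by omega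
      rw [this]
    · rw [if_neg he]
      have hlt : i < i0 := lt_of_le_of_ne hii0 (fun h => he (by rw [h]; exact heq))
      have e1 : step ((stepFn b k)^[i] x0) b k = (stepFn b k)^[i + 1] x0 := by
        rw [Function.iterate_succ_apply']; rfl
      have e2 : step (step ((stepFn b k)^[2 * i] x0) b k) b k
          = (stepFn b k)^[2 * (i + 1)] x0 := by
        have e : 2 * (i + 1) = 2 * i + 1 + 1 := by ring
        rw [e, Function.iterate_succ_apply', Function.iterate_succ_apply']; rfl
      rw [e2, e1]
      exact ih (i + 1) (by omega) hlt (by omega)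

lemma meet_exists (b : Int) (k : Nat) (x0 : String) (μ lam : Nat) (hlam : 1 ≤ lam)
    (hper : (stepFn b k)^[μ + lam] x0 = (stepFn b k)^[μ] x0) :
    ∃ i, 1 ≤ i ∧ (stepFn b k)^[i] x0 = (stepFn b k)^[2 * i] x0 ∧ i ≤ μ + lam := by
  refine ⟨(μ / lam + 1) * lam, ?_, ?_, ?_⟩
  · have h := Nat.mul_le_mul (Nat.le_add_left 1 (μ / lam)) hlam
    simpa using h
  · have hqm := Nat.div_add_mod μ lam
    have hmlt : μ % lam < lam := Nat.mod_lt _ (by omega)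
    have hμle : μ ≤ (μ / lam + 1) * lam := by
      have e : (μ / lam + 1) * lam = lam * (μ / lam) + lam := by ring
      omega
    have h2 : 2 * ((μ / lam + 1) * lam) = (μ / lam + 1) * lam + (μ / lam + 1) * lam := by
      ring
    rw [h2, orbit_add_mul (stepFn b k) x0 μ lam hper (μ / lam + 1) _ hμle]
  · have h3 : (μ / lam + 1) * lam = μ / lam * lam + lam := by ring
    have h4 : μ / lam * lam ≤ μ := Nat.div_mul_le_self μ lam
    omega

lemma meet_ge_mu (b : Int) (k : Nat) (x0 : String) (μ lam : Nat) (hlam : 1 ≤ lam)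
    (hper : (stepFn b k)^[μ + lam] x0 = (stepFn b k)^[μ] x0)
    (hinj : ∀ s t, s < t → t < μ + lam → (stepFn b k)^[s] x0 ≠ (stepFn b k)^[t] x0)
    (i0 : Nat) (h1 : 1 ≤ i0) (heq : (stepFn b k)^[i0] x0 = (stepFn b k)^[2 * i0] x0)
    (_hle : i0 ≤ μ + lam) : μ ≤ i0 := by
  by_contra hcon
  rw [Nat.not_le] at hcon
  have h2i : μ + lam ≤ 2 * i0 := by
    by_contra h2
    rw [Nat.not_le] at h2
    exact hinj i0 (2 * i0) (by omega) h2 heq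
  have hred := orbit_reduce (stepFn b k) x0 μ lam hlam hper (2 * i0) (by omega)
  have hr : (2 * i0 - μ) % lam < lam := Nat.mod_lt _ (by omega)
  have : (stepFn b k)^[i0] x0 = (stepFn b k)^[μ + (2 * i0 - μ) % lam] x0 := by
    rw [heq, hred]
  exact hinj i0 (μ + (2 * i0 - μ) % lam) (by omega) (by omega) this

lemma B_period (b : Int) (k : Nat) (x0 : String) (μ lam i0 : Nat) (hlam : 1 ≤ lam)
    (hper : (stepFn b k)^[μ + lam] x0 = (stepFn b k)^[μ] x0)
    (hinj : ∀ s t, s < t → t < μ + lam → (stepFn b k)^[s] x0 ≠ (stepFn b k)^[t] x0)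
    (hμ : μ ≤ i0) :
    ∀ fuel q, 1 ≤ q → q ≤ lam → lam - q ≤ fuel →
      periodLoop b k fuel ((stepFn b k)^[i0] x0) ((stepFn b k)^[i0 + q] x0) (q : Int)
        = (lam : Int) := by
  intro fuel
  induction fuel with
  | zero =>
    intro q h1q hqlam hf
    have : q = lam := by omega
    subst this
    simp [periodLoop]
  | succ fuel ih =>
    intro q h1q hqlam hf
    rw [periodLoop]
    by_cases he : (stepFn b k)^[i0 + q] x0 = (stepFn b k)^[i0] x0
    · rw [if_pos he]
      have hdvd : lam ∣ q := orbit_dvd (stepFn b k) x0 μ lam hlam hper hinj i0 q hμ h1q he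
      have : q = lam := by
        have := Nat.le_of_dvd (by omega) hdvd
        omega
      rw [this]
    · rw [if_neg he]
      have hqlt : q < lam := by
        rcases Nat.lt_or_ge q lam with h | h
        · exact h
        · exfalso
          have hq : q = lam := by omega
          rw [hq] at he
          exact he (orbit_add (stepFn b k) x0 μ lam hper i0 hμ)
      have e1 : step ((stepFn b k)^[i0 + q] x0) b k = (stepFn b k)^[i0 + (q + 1)] x0 := by
        have e : i0 + (q + 1) = (i0 + q) + 1 := by ring
        rw [e, Function.iterate_succ_apply']; rfl
      have e2 : (q : Int) + 1 = ((q + 1 : Nat) : Int) := by push_cast; ring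
      rw [e2, e1]
      exact ih (q + 1) (by omega) hqlt (by omega)

lemma B_val (b : Int) (k : Nat) (x0 : String) (μ lam : Nat) (hlam : 1 ≤ lam)
    (hper : (stepFn b k)^[μ + lam] x0 = (stepFn b k)^[μ] x0)
    (hinj : ∀ s t, s < t → t < μ + lam → (stepFn b k)^[s] x0 ≠ (stepFn b k)^[t] x0)
    (F : Nat) (hF : μ + lam ≤ F) :
    periodLoop b k F (floydLoop b k F (step x0 b k) (step (step x0 b k) b k))
      (step (floydLoop b k F (step x0 b k) (step (step x0 b k) b k)) b k) 1
      = (lam : Int) := by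
  classical
  obtain ⟨iw, hiw1, hiweq, hiwle⟩ := meet_exists b k x0 μ lam hlam hper
  have hPex : ∃ i, 1 ≤ i ∧ (stepFn b k)^[i] x0 = (stepFn b k)^[2 * i] x0 :=
    ⟨iw, hiw1, hiweq⟩
  have hPi0 := Nat.find_spec hPex
  have hi0le : Nat.find hPex ≤ iw := Nat.find_min' hPex ⟨hiw1, hiweq⟩
  have hmin : ∀ j, 1 ≤ j → (stepFn b k)^[j] x0 = (stepFn b k)^[2 * j] x0 →
      Nat.find hPex ≤ j := fun j h1 h2 => Nat.find_min' hPex ⟨h1, h2⟩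
  have e1 : step x0 b k = (stepFn b k)^[1] x0 := by
    rw [Function.iterate_one]; rfl
  have e2 : step (step x0 b k) b k = (stepFn b k)^[2 * 1] x0 := by
    show step (step x0 b k) b k = (stepFn b k)^[2] x0
    rw [show (2 : Nat) = 1 + 1 from rfl, Function.iterate_succ_apply',
      Function.iterate_one]; rfl
  rw [e2, e1]
  have hfl := B_floyd b k x0 (Nat.find hPex) hPi0.1 hPi0.2 hmin F 1 (le_refl 1)
    hPi0.1 (by omega)
  rw [hfl]
  have hμi0 : μ ≤ Nat.find hPex :=
    meet_ge_mu b k x0 μ lam hlam hper hinj (Nat.find hPex) hPi0.1 hPi0.2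
      (le_trans hi0le hiwle)
  have e3 : step ((stepFn b k)^[Nat.find hPex] x0) b k
      = (stepFn b k)^[Nat.find hPex + 1] x0 := by
    rw [Function.iterate_succ_apply']; rfl
  rw [e3]
  have h := B_period b k x0 μ lam (Nat.find hPex) hlam hper hinj hμi0 F 1
    (le_refl 1) hlam (by omega)
  simpa using h

-- ---------- the orbit repeats: digit-string analysis ----------

lemma mulam_of_repeat (b : Int) (k : Nat) (x0 : String) (s t : Nat) (hst : s < t)
    (heq : (stepFn b k)^[s] x0 = (stepFn b k)^[t] x0) :
    ∃ μ lam, 1 ≤ lam ∧ (stepFn b k)^[μ + lam] x0 = (stepFn b k)^[μ] x0 ∧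
      (∀ u v, u < v → v < μ + lam → (stepFn b k)^[u] x0 ≠ (stepFn b k)^[v] x0) ∧
      μ + lam ≤ t := by
  classical
  set Q : Nat → Prop := fun u => ∃ v, v < u ∧ (stepFn b k)^[v] x0 = (stepFn b k)^[u] x0
    with hQ
  have hQex : ∃ u, Q u := ⟨t, s, hst, heq⟩
  let T := Nat.find hQex
  have hQT : Q T := Nat.find_spec hQex
  have hTle : T ≤ t := Nat.find_min' hQex ⟨s, hst, heq⟩
  obtain ⟨μ, hμT, hμeq⟩ := hQT
  refine ⟨μ, T - μ, by omega, ?_, ?_, by omega⟩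
  · have e : μ + (T - μ) = T := by omega
    rw [e, hμeq]
  · intro u v huv hv heq'
    have hvT : v < T := by omega
    exact Nat.find_min hQex hvT ⟨u, huv, heq'⟩


-- ---------- digit-string analysis of the transform ----------

lemma digit_mem (c : Char) (h1 : '0' ≤ c) (h2 : c ≤ '9') :
    c ∈ ['0','1','2','3','4','5','6','7','8','9'] := by
  have h48 : 48 ≤ c.toNat := by
    have := h1; rw [Char.le_def] at this; exact UInt32.le_iff_toNat_le.mp this
  have h57 : c.toNat ≤ 57 := by
    have := h2; rw [Char.le_def] at this; exact UInt32.le_iff_toNat_le.mp this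
  have hc : Char.ofNat c.toNat = c := Char.ofNat_toNat c
  rw [← hc]
  interval_cases h : c.toNat <;> decide

lemma pvIntOfChar_digit (c : Char) (h1 : '0' ≤ c) (h2 : c ≤ '9') :
    pvIntOfChar c = (c.toNat : Int) - 48 := by
  have hm := digit_mem c h1 h2
  fin_cases hm <;> decide

lemma digit_toNat_ge (c : Char) (h1 : '0' ≤ c) (h2 : c ≤ '9') : 48 ≤ c.toNat := by
  have hm := digit_mem c h1 h2
  fin_cases hm <;> decide

lemma digit_toNat_le (c : Char) (h1 : '0' ≤ c) (h2 : c ≤ '9') : c.toNat ≤ 57 := by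
  have hm := digit_mem c h1 h2
  fin_cases hm <;> decide

lemma btd_append (l : List Char) (c : Char) (b : Int) :
    binary_to_decimal (l ++ [c]) b = b * binary_to_decimal l b + pvIntOfChar c := by
  simp [binary_to_decimal, List.foldl_append]

-- 0 ≤ value and (b-1) * value ≤ 9 * (b^len - 1) for digit strings
lemma btd_bounds (b : Int) (hb : 2 ≤ b) :
    ∀ l : List Char, (∀ c ∈ l, '0' ≤ c ∧ c ≤ '9') →
      0 ≤ binary_to_decimal l b ∧
        (b - 1) * binary_to_decimal l b ≤ 9 * (b ^ l.length - 1) := by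
  intro l
  induction l using List.reverseRecOn with
  | nil => intro _; simp [binary_to_decimal]
  | append_singleton l c ih =>
    intro hd
    have hdl : ∀ c' ∈ l, '0' ≤ c' ∧ c' ≤ '9' := fun c' hc' => hd c' (by simp [hc'])
    obtain ⟨h0, hle⟩ := ih hdl
    have hcd := hd c (by simp)
    have he : pvIntOfChar c = (c.toNat : Int) - 48 := pvIntOfChar_digit c hcd.1 hcd.2
    have he0 : 0 ≤ pvIntOfChar c := by
      have := digit_toNat_ge c hcd.1 hcd.2; rw [he]; omega
    have he9 : pvIntOfChar c ≤ 9 := by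
      have := digit_toNat_le c hcd.1 hcd.2; rw [he]; omega
    rw [btd_append]
    constructor
    · positivity
    · have hpow : (b : Int) ^ (l ++ [c]).length = b ^ l.length * b := by
        simp [pow_succ]
      rw [hpow]
      have hbp : (1 : Int) ≤ b ^ l.length := one_le_pow₀ (by omega)
      nlinarith [h0, hle, he0, he9]

-- value < b^len when every digit is < b
lemma btd_lt (b : Int) (hb : 2 ≤ b) :
    ∀ l : List Char, (∀ c ∈ l, '0' ≤ c ∧ c ≤ '9' ∧ (c.toNat : Int) - 48 < b) →
      binary_to_decimal l b < b ^ l.length := by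
  intro l
  induction l using List.reverseRecOn with
  | nil => intro _; simp [binary_to_decimal]
  | append_singleton l c ih =>
    intro hd
    have hdl := fun c' hc' => hd c' (List.mem_append_left _ hc')
    have hlt := ih hdl
    have h0 := (btd_bounds b hb l (fun c' hc' => ⟨(hdl c' hc').1, (hdl c' hc').2.1⟩)).1
    have hcd := hd c (by simp)
    have he : pvIntOfChar c = (c.toNat : Int) - 48 := pvIntOfChar_digit c hcd.1 hcd.2.1
    have heb : pvIntOfChar c < b := by rw [he]; exact hcd.2.2
    have he0 : 0 ≤ pvIntOfChar c := by
      have := digit_toNat_ge c hcd.1 hcd.2.1; rw [he]; omega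
    rw [btd_append]
    have hpow : (b : Int) ^ (l ++ [c]).length = b ^ l.length * b := by simp [pow_succ]
    rw [hpow]
    nlinarith [hlt, h0, heb, he0]

-- digit-string value is < b ^ (len + 4)  (digits ≤ 9, any base 2..10)
lemma btd_lt_pow4 (b : Int) (hb : 2 ≤ b) (l : List Char)
    (hd : ∀ c ∈ l, '0' ≤ c ∧ c ≤ '9') :
    binary_to_decimal l b < b ^ (l.length + 4) := by
  obtain ⟨h0, hle⟩ := btd_bounds b hb l hd
  have hpow : (b : Int) ^ (l.length + 4) = b ^ l.length * b ^ 4 := by ring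
  have hb4 : (16 : Int) ≤ b ^ 4 := by
    have h2 : (4 : Int) ≤ b ^ 2 := by nlinarith
    calc (16 : Int) = 4 * 4 := by norm_num
      _ ≤ b ^ 2 * b ^ 2 := mul_le_mul h2 h2 (by norm_num) (by positivity)
      _ = b ^ 4 := by ring
  have hbp : (1 : Int) ≤ b ^ l.length := one_le_pow₀ (by omega)
  have e2 : b ^ l.length * b ^ 4 ≤ (b - 1) * (b ^ l.length * b ^ 4) := by
    have hnn := mul_nonneg (by omega : (0 : Int) ≤ b - 2)
      (by positivity : (0 : Int) ≤ b ^ l.length * b ^ 4)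
    nlinarith [hnn]
  have h1 : (b - 1) * binary_to_decimal l b < (b - 1) * (b ^ l.length * b ^ 4) := by
    nlinarith [hle, hb4, hbp, e2]
  have := lt_of_mul_lt_mul_left h1 (by omega : (0 : Int) ≤ b - 1)
  rw [hpow]; exact this

lemma toChars_small (d : Nat) (h : d ≤ 9) :
    PySem.Int.toChars (d : Int) = [Char.ofNat (48 + d)] := by
  interval_cases d <;> decide

lemma ofNat_digit_props (d : Nat) (h : d ≤ 9) :
    '0' ≤ Char.ofNat (48 + d) ∧ Char.ofNat (48 + d) ≤ '9'
      ∧ (Char.ofNat (48 + d)).toNat = 48 + d := by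
  interval_cases d <;> exact ⟨by decide, by decide, by decide⟩

-- the while-loop of decimal_to_binary produces at most m digits, all < b
lemma d2bLoop_spec (b : Int) (hb : 2 ≤ b) (hb10 : b ≤ 10) :
    ∀ (m : Nat) (v : Int) (acc : List Char) (fuel : Nat), v < b ^ m → v.toNat < fuel →
      ∃ l, d2bLoop fuel v b acc = l ++ acc ∧ l.length ≤ m ∧
        ∀ c ∈ l, '0' ≤ c ∧ c ≤ '9' ∧ (c.toNat : Int) - 48 < b := by
  intro m
  induction m with
  | zero =>
    intro v acc fuel hv hf
    refine ⟨[], ?_, by simp, by simp⟩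
    have hv0 : ¬ v > 0 := by simp at hv ⊢; omega
    cases fuel with
    | zero => omega
    | succ fuel => rw [d2bLoop, if_neg hv0]; rfl
  | succ m ih =>
    intro v acc fuel hv hf
    cases fuel with
    | zero => omega
    | succ fuel =>
      by_cases hv0 : v > 0
      · rw [d2bLoop, if_pos hv0]
        have hbpos : (0 : Int) < b := by omega
        have hq0 : 0 ≤ PySem.Int.floordiv v b := by
          rw [PySem.Int.floordiv_eq_ediv_of_pos hbpos]
          exact Int.ediv_nonneg (by omega) (by omega)
        have hqm : PySem.Int.floordiv v b < b ^ m := by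
          rw [PySem.Int.floordiv_lt_iff_lt_mul hbpos]
          calc v < b ^ (m + 1) := hv
            _ = b ^ m * b := by ring
        have hqv : PySem.Int.floordiv v b < v := by
          rw [PySem.Int.floordiv_lt_iff_lt_mul hbpos]
          nlinarith
        have hfq : (PySem.Int.floordiv v b).toNat < fuel := by omega
        have hd0 : 0 ≤ PySem.Int.mod v b := PySem.Int.mod_nonneg v hbpos
        have hdb : PySem.Int.mod v b < b := PySem.Int.mod_lt v hbpos
        have hd9 : (PySem.Int.mod v b).toNat ≤ 9 := by omega
        have hdc : PySem.Int.mod v b = ((PySem.Int.mod v b).toNat : Int) := by omega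
        have htc : PySem.Int.toChars (PySem.Int.mod v b)
            = [Char.ofNat (48 + (PySem.Int.mod v b).toNat)] := by
          rw [hdc]; exact toChars_small _ hd9
        obtain ⟨l, hl, hlen, hchars⟩ := ih (PySem.Int.floordiv v b)
          (PySem.Int.toChars (PySem.Int.mod v b) ++ acc) fuel hqm hfq
        refine ⟨l ++ [Char.ofNat (48 + (PySem.Int.mod v b).toNat)], ?_, by simp; omega, ?_⟩
        · rw [hl, htc]; simp
        · intro c hc
          rcases List.mem_append.mp hc with h | h
          · exact hchars c h
          · obtain ⟨p1, p2, p3⟩ := ofNat_digit_props _ hd9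
            have hc' : c = Char.ofNat (48 + (PySem.Int.mod v b).toNat) := by simpa using h
            subst hc'
            exact ⟨p1, p2, by rw [p3]; push_cast; omega⟩
      · rw [d2bLoop, if_neg hv0]
        exact ⟨[], rfl, by simp, by simp⟩

lemma zfill_digits (l : List Char) (k : Nat) (hd : ∀ c ∈ l, '0' ≤ c ∧ c ≤ '9') :
    PySem.Chars.zfill l (k : Int) = List.replicate (k - l.length) '0' ++ l := by
  unfold PySem.Chars.zfill
  split
  · next hk =>
    have hk' : k ≤ l.length := by exact_mod_cast hk
    have hz : k - l.length = 0 := by omega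
    rw [hz]
    simp
  · next hk =>
    have hk' : l.length < k := by
      have : ¬ (k : Int) ≤ l.length := hk
      omega
    split
    · next c rest =>
      have hcd := hd c (by simp)
      have hns : ¬(c = '+' ∨ c = '-') := by
        rintro (rfl | rfl)
        · exact absurd hcd.1 (by decide)
        · exact absurd hcd.1 (by decide)
      rw [if_neg hns]
      simp
    · next =>
      simp

-- what one transform step produces: a digit string (digits < b), length between
-- k and max k m whenever the subtraction value is < b^m
lemma step_spec (b : Int) (hb : 2 ≤ b) (hb10 : b ≤ 10) (k m : Nat) (s : String)
    (hval : binary_to_decimal (PySem.List.sorted s.toList (fun c => c) true) b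
      - binary_to_decimal (PySem.List.sorted s.toList (fun c => c) false) b < b ^ m) :
    (∀ c ∈ (step s b k).toList, '0' ≤ c ∧ c ≤ '9' ∧ (c.toNat : Int) - 48 < b) ∧
      k ≤ (step s b k).toList.length ∧ (step s b k).toList.length ≤ max k m := by
  set v := binary_to_decimal (PySem.List.sorted s.toList (fun c => c) true) b
    - binary_to_decimal (PySem.List.sorted s.toList (fun c => c) false) b with hv
  obtain ⟨l, hl, hlen, hchars⟩ := d2bLoop_spec b hb hb10 m v [] (v.toNat + 1) hval (by omega)
  have hstep : (step s b k).toList = List.replicate (k - l.length) '0' ++ l := by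
    show (decimal_to_binary v b k).toList = _
    rw [decimal_to_binary, String.toList_ofList]
    rw [show d2bLoop (v.toNat + 1) v b [] = l from by simpa using hl]
    exact zfill_digits l k (fun c hc => ⟨(hchars c hc).1, (hchars c hc).2.1⟩)
  rw [hstep]
  refine ⟨?_, ?_, ?_⟩
  · intro c hc
    rcases List.mem_append.mp hc with h | h
    · have : c = '0' := List.eq_of_mem_replicate h
      subst this
      refine ⟨le_refl _, by decide, ?_⟩
      have h48 : ('0'.toNat : Int) = 48 := by decide
      omega
    · exact hchars c h
  · simp only [List.length_append, List.length_replicate]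
    omega
  · simp only [List.length_append, List.length_replicate]
    omega

lemma step_init (b : Int) (hb : 2 ≤ b) (hb10 : b ≤ 10) (k : Nat) (s : String)
    (hd : ∀ c ∈ s.toList, '0' ≤ c ∧ c ≤ '9') (hlen : s.toList.length = k) :
    (∀ c ∈ (step s b k).toList, '0' ≤ c ∧ c ≤ '9' ∧ (c.toNat : Int) - 48 < b) ∧
      k ≤ (step s b k).toList.length ∧ (step s b k).toList.length ≤ k + 4 := by
  have hdx : ∀ c ∈ PySem.List.sorted s.toList (fun c => c) true, '0' ≤ c ∧ c ≤ '9' :=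
    fun c hc => hd c ((PySem.List.mem_sorted _ _ _ _).mp hc)
  have hdy : ∀ c ∈ PySem.List.sorted s.toList (fun c => c) false, '0' ≤ c ∧ c ≤ '9' :=
    fun c hc => hd c ((PySem.List.mem_sorted _ _ _ _).mp hc)
  have hx := btd_lt_pow4 b hb _ hdx
  have hy := (btd_bounds b hb _ hdy).1
  have hlx : (PySem.List.sorted s.toList (fun c => c) true).length = k := by
    rw [PySem.List.length_sorted, hlen]
  rw [hlx] at hx
  have hval : binary_to_decimal (PySem.List.sorted s.toList (fun c => c) true) b
      - binary_to_decimal (PySem.List.sorted s.toList (fun c => c) false) b < b ^ (k + 4) := by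
    omega
  have h := step_spec b hb hb10 k (k + 4) s hval
  exact ⟨h.1, h.2.1, le_trans h.2.2 (by omega)⟩

lemma step_pres (b : Int) (hb : 2 ≤ b) (hb10 : b ≤ 10) (k : Nat) (s : String)
    (hd : ∀ c ∈ s.toList, '0' ≤ c ∧ c ≤ '9' ∧ (c.toNat : Int) - 48 < b)
    (hlen1 : k ≤ s.toList.length) (hlen2 : s.toList.length ≤ k + 4) :
    (∀ c ∈ (step s b k).toList, '0' ≤ c ∧ c ≤ '9' ∧ (c.toNat : Int) - 48 < b) ∧
      k ≤ (step s b k).toList.length ∧ (step s b k).toList.length ≤ k + 4 := by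
  have hdx : ∀ c ∈ PySem.List.sorted s.toList (fun c => c) true,
      '0' ≤ c ∧ c ≤ '9' ∧ (c.toNat : Int) - 48 < b :=
    fun c hc => hd c ((PySem.List.mem_sorted _ _ _ _).mp hc)
  have hdy : ∀ c ∈ PySem.List.sorted s.toList (fun c => c) false, '0' ≤ c ∧ c ≤ '9' :=
    fun c hc => ⟨(hd c ((PySem.List.mem_sorted _ _ _ _).mp hc)).1,
      (hd c ((PySem.List.mem_sorted _ _ _ _).mp hc)).2.1⟩
  have hx := btd_lt b hb _ hdx
  have hy := (btd_bounds b hb _ hdy).1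
  have hlx : (PySem.List.sorted s.toList (fun c => c) true).length = s.toList.length :=
    PySem.List.length_sorted _ _ _
  rw [hlx] at hx
  have hval : binary_to_decimal (PySem.List.sorted s.toList (fun c => c) true) b
      - binary_to_decimal (PySem.List.sorted s.toList (fun c => c) false) b
      < b ^ s.toList.length := by omega
  have h := step_spec b hb hb10 k s.toList.length s hval
  exact ⟨h.1, h.2.1, le_trans h.2.2 (by omega)⟩

lemma inv_orbit (b : Int) (hb : 2 ≤ b) (hb10 : b ≤ 10) (k : Nat) (x0 : String)
    (hd : ∀ c ∈ x0.toList, '0' ≤ c ∧ c ≤ '9') (hlen : x0.toList.length = k) :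
    ∀ t, 1 ≤ t →
      (∀ c ∈ ((stepFn b k)^[t] x0).toList, '0' ≤ c ∧ c ≤ '9' ∧ (c.toNat : Int) - 48 < b) ∧
        k ≤ ((stepFn b k)^[t] x0).toList.length ∧
        ((stepFn b k)^[t] x0).toList.length ≤ k + 4 := by
  intro t
  induction t with
  | zero => omega
  | succ t ih =>
    intro _
    rcases Nat.eq_zero_or_pos t with rfl | ht
    · simpa [Function.iterate_one, stepFn] using step_init b hb hb10 k x0 hd hlen
    · obtain ⟨h1, h2, h3⟩ := ih ht
      rw [Function.iterate_succ_apply']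
      exact step_pres b hb hb10 k _ h1 h2 h3

-- ---------- injective numeric encoding of digit strings (for the pigeonhole) ----------

def encC (l : List Char) : Nat := l.foldl (fun a c => 11 * a + (c.toNat - 47)) 0

lemma encC_append (l : List Char) (c : Char) :
    encC (l ++ [c]) = 11 * encC l + (c.toNat - 47) := by
  simp [encC, List.foldl_append]

lemma encC_lt (l : List Char) (hd : ∀ c ∈ l, '0' ≤ c ∧ c ≤ '9') :
    encC l < 11 ^ l.length := by
  induction l using List.reverseRecOn with
  | nil => simp [encC]
  | append_singleton l c ih =>
    have hdl : ∀ c' ∈ l, '0' ≤ c' ∧ c' ≤ '9' := fun c' hc' => hd c' (by simp [hc'])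
    have hlt := ih hdl
    have hcd := hd c (by simp)
    have h57 := digit_toNat_le c hcd.1 hcd.2
    rw [encC_append]
    have hpow : (11 : Nat) ^ (l ++ [c]).length = 11 ^ l.length * 11 := by
      simp [pow_succ]
    rw [hpow]
    omega

lemma encC_inj : ∀ l1 : List Char, (∀ c ∈ l1, '0' ≤ c ∧ c ≤ '9') →
    ∀ l2 : List Char, (∀ c ∈ l2, '0' ≤ c ∧ c ≤ '9') →
    encC l1 = encC l2 → l1 = l2 := by
  intro l1
  induction l1 using List.reverseRecOn with
  | nil =>
    intro _ l2 hd2 heq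
    rcases List.eq_nil_or_concat' l2 with rfl | ⟨l2', c2, rfl⟩
    · rfl
    · exfalso
      have hc2 := hd2 c2 (by simp)
      have h48 := digit_toNat_ge c2 hc2.1 hc2.2
      rw [encC_append] at heq
      simp [encC] at heq
      omega
  | append_singleton l1' c1 ih =>
    intro hd1 l2 hd2 heq
    rcases List.eq_nil_or_concat' l2 with rfl | ⟨l2', c2, rfl⟩
    · exfalso
      have hc1 := hd1 c1 (by simp)
      have h48 := digit_toNat_ge c1 hc1.1 hc1.2
      rw [encC_append] at heq
      simp [encC] at heq
      omega
    · have hc1 := hd1 c1 (by simp)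
      have hc2 := hd2 c2 (by simp)
      have h148 := digit_toNat_ge c1 hc1.1 hc1.2
      have h157 := digit_toNat_le c1 hc1.1 hc1.2
      have h248 := digit_toNat_ge c2 hc2.1 hc2.2
      have h257 := digit_toNat_le c2 hc2.1 hc2.2
      rw [encC_append, encC_append] at heq
      have hcn : c1.toNat = c2.toNat := by omega
      have hen : encC l1' = encC l2' := by omega
      have hl : l1' = l2' := ih (fun c hc => hd1 c (by simp [hc])) l2'
        (fun c hc => hd2 c (by simp [hc])) hen
      have hcc : c1 = c2 := by
        have e1 : Char.ofNat c1.toNat = c1 := Char.ofNat_toNat c1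
        have e2 : Char.ofNat c2.toNat = c2 := Char.ofNat_toNat c2
        rw [← e1, ← e2, hcn]
      rw [hl, hcc]

lemma repeat_exists (b : Int) (hb : 2 ≤ b) (hb10 : b ≤ 10) (k : Nat) (x0 : String)
    (hd : ∀ c ∈ x0.toList, '0' ≤ c ∧ c ≤ '9') (hlen : x0.toList.length = k) :
    ∃ s t, s < t ∧ t ≤ 11 ^ (k + 4) + 1 ∧ (stepFn b k)^[s] x0 = (stepFn b k)^[t] x0 := by
  classical
  set M := 11 ^ (k + 4) with hM
  have hmaps : ∀ t ∈ Finset.range (M + 1),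
      encC (((stepFn b k)^[t + 1] x0).toList) ∈ Finset.range M := by
    intro t _
    obtain ⟨h1, h2, h3⟩ := inv_orbit b hb hb10 k x0 hd hlen (t + 1) (by omega)
    have hdig : ∀ c ∈ ((stepFn b k)^[t + 1] x0).toList, '0' ≤ c ∧ c ≤ '9' :=
      fun c hc => ⟨(h1 c hc).1, (h1 c hc).2.1⟩
    have := encC_lt _ hdig
    have hle : (11 : Nat) ^ ((stepFn b k)^[t + 1] x0).toList.length ≤ 11 ^ (k + 4) :=
      Nat.pow_le_pow_right (by omega) h3
    simp only [Finset.mem_range]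
    omega
  obtain ⟨a, ha, a', ha', hne, heq⟩ :=
    Finset.exists_ne_map_eq_of_card_lt_of_maps_to (by simp) hmaps
  have hstr : (stepFn b k)^[a + 1] x0 = (stepFn b k)^[a' + 1] x0 := by
    apply String.toList_inj.mp
    apply encC_inj _ ?_ _ ?_ heq
    · obtain ⟨h1, _, _⟩ := inv_orbit b hb hb10 k x0 hd hlen (a + 1) (by omega)
      exact fun c hc => ⟨(h1 c hc).1, (h1 c hc).2.1⟩
    · obtain ⟨h1, _, _⟩ := inv_orbit b hb hb10 k x0 hd hlen (a' + 1) (by omega)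
      exact fun c hc => ⟨(h1 c hc).1, (h1 c hc).2.1⟩
  simp only [Finset.mem_range] at ha ha'
  rcases Nat.lt_or_ge a a' with h | h
  · exact ⟨a + 1, a' + 1, by omega, by omega, hstr⟩
  · have hlt : a' < a := by omega
    exact ⟨a' + 1, a + 1, by omega, by omega, hstr.symm⟩

-- ---------- the all-equal-digits case: the transform is constantly 0^k ----------

lemma zfill_nil (k : Nat) : PySem.Chars.zfill [] (k : Int) = List.replicate k '0' := by
  unfold PySem.Chars.zfill
  split
  · next hk =>
    have : k = 0 := by
      have : (k : Int) ≤ 0 := by simpa using hk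
      omega
    simp [this]
  · next => simp

lemma step_const (b : Int) (k : Nat) (s : String)
    (hconst : ∀ c ∈ s.toList, ∀ d ∈ s.toList, c = d) :
    step s b k = String.ofList (List.replicate k '0') := by
  have hpair : s.toList.Pairwise (fun a b : Char => a ≤ b) := by
    rw [List.pairwise_iff_forall_sublist]
    intro a c hs
    have hm := hs.subset
    exact le_of_eq (hconst a (hm (by simp)) c (hm (by simp)))
  have hpair' : s.toList.Pairwise (fun a b : Char => b ≤ a) := by
    rw [List.pairwise_iff_forall_sublist]
    intro a c hs
    have hm := hs.subset
    exact le_of_eq (hconst c (hm (by simp)) a (hm (by simp)))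
  have hs1 : PySem.List.sorted s.toList (fun c => c) true = s.toList :=
    PySem.List.sorted_rev_eq_self_of_pairwise _ _ hpair'
  have hs2 : PySem.List.sorted s.toList (fun c => c) false = s.toList :=
    PySem.List.sorted_eq_self_of_pairwise _ _ hpair
  show decimal_to_binary _ b k = _
  rw [hs1, hs2, sub_self]
  unfold decimal_to_binary
  norm_num [d2bLoop, zfill_nil]

lemma const_repeat (b : Int) (k : Nat) (x0 : String)
    (hconst : ∀ c ∈ x0.toList, ∀ d ∈ x0.toList, c = d) :
    (stepFn b k)^[1] x0 = (stepFn b k)^[2] x0 := by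
  have h1 : (stepFn b k)^[1] x0 = String.ofList (List.replicate k '0') := by
    rw [Function.iterate_one]
    exact step_const b k x0 hconst
  have h2 : (stepFn b k)^[2] x0 = String.ofList (List.replicate k '0') := by
    rw [show (2 : Nat) = 1 + 1 from rfl, Function.iterate_succ_apply', h1]
    apply step_const
    intro c hc d hd
    rw [String.toList_ofList] at hc hd
    rw [List.eq_of_mem_replicate hc, List.eq_of_mem_replicate hd]
  rw [h1, h2]

-- fuel is ample: 11^(k+4)+1 < 11^(k+6)
lemma fuel_ample (k : Nat) : 11 ^ (k + 4) + 1 ≤ 11 ^ (k + 6) := by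
  have h : 11 ^ (k + 6) = 11 ^ (k + 4) * 121 := by ring
  have h1 : 1 ≤ 11 ^ (k + 4) := Nat.one_le_pow _ _ (by omega)
  omega

-- ===== VERDICT (by name: the statement is the Claim_ definition above) =====
theorem solution_spec : Claim_equal_solution := by
  intro n b _ hpre
  obtain ⟨hdig, hcase⟩ := hpre
  have hd : ∀ c ∈ n.toList, '0' ≤ c ∧ c ≤ '9' := by
    intro c hc
    have := List.all_eq_true.mp hdig c hc
    simpa using this
  have hlen : n.toList.length = n.length := String.length_toList
  unfold Spec_solution
  show solution n b = solution_alt n b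
  unfold solution solution_alt
  rcases hcase with ⟨hb2, hb10⟩ | hconst
  · obtain ⟨s, t, hst, htle, heq⟩ := repeat_exists b hb2 hb10 n.length n hd hlen
    obtain ⟨μ, lam, hlam, hper, hinj, hmt⟩ := mulam_of_repeat b n.length n s t hst heq
    have hbound : μ + lam ≤ 11 ^ (n.length + 6) :=
      le_trans hmt (le_trans htle (fuel_ample n.length))
    rw [A_val b n.length n μ lam hlam hper hinj _ hbound,
      B_val b n.length n μ lam hlam hper hinj _ hbound]
  · have hconst' : ∀ c ∈ n.toList, ∀ d ∈ n.toList, c = d := by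
      intro c hc d hdm
      have := List.all_eq_true.mp (List.all_eq_true.mp hconst c hc) d hdm
      simpa using this
    have heq := const_repeat b n.length n hconst'
    obtain ⟨μ, lam, hlam, hper, hinj, hmt⟩ :=
      mulam_of_repeat b n.length n 1 2 (by omega) heq
    have hbound : μ + lam ≤ 11 ^ (n.length + 6) := by
      have h1 : 1 ≤ 11 ^ (n.length + 4) := Nat.one_le_pow _ _ (by omega)
      have := fuel_ample n.length
      omega
    rw [A_val b n.length n μ lam hlam hper hinj _ hbound,
      B_val b n.length n μ lam hlam hper hinj _ hbound]
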